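-- pv_equiv track=rewrite | github.com/PatneP/Information-Retrieval | Boolean_model/boolean_model.py | solveBracket
-- ===== SOURCE A (Python) =====
-- def AND_operation(postings1, postings2):
-- 	return (postings1 & postings2)
--
-- def OR_operation(postings1, postings2):
-- 	return (postings1 | postings2)
--
-- def solveBracket(internal_query, universalSet, reverseIndex, bracket_results):
-- 	if 'bracket_result' in internal_query[0]:
-- 		result = bracket_results[internal_query[0].strip()]
-- 	else:
-- 		if 'not_' in internal_query[0]:
-- 			result = universalSet - reverseIndex[internal_query[0].replace('not_', '').strip()]
-- 		else:
-- 			result = reverseIndex[internal_query[0]]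
-- 	for i in range(1, len(internal_query) - 1, 2):
-- 		operator = internal_query[i]
-- 		operand2 = internal_query[i + 1]
-- 		if 'bracket_result' in operand2:
-- 			term2 = bracket_results[operand2.strip()]
-- 		elif 'not_' in operand2:
-- 			term2 = universalSet - reverseIndex[operand2.replace('not_', '').strip()]
-- 		else:
-- 			term2 = reverseIndex[operand2]
-- 		if operator == "and":
-- 			result = AND_operation(result, term2)
-- 		elif operator == "or":
-- 			result = OR_operation(result, term2)
-- 	return result
-- ===== SOURCE B (Python) =====
-- def solveBracket(internal_query, universalSet, reverseIndex, bracket_results):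
--     def resolve(tok):
--         if 'bracket_result' in tok:
--             return bracket_results[tok.strip()]
--         if 'not_' in tok:
--             return universalSet - reverseIndex[tok.replace('not_', '').strip()]
--         return reverseIndex[tok]
--
--     apply_op = {"and": lambda x, y: x & y, "or": lambda x, y: x | y}
--     stack = internal_query[::-1]
--     result = resolve(stack.pop())
--     while len(stack) >= 2:
--         op = stack.pop()
--         term = resolve(stack.pop())
--         result = apply_op.get(op, lambda x, _y: x)(result, term)
--     return result
-- ===== Notes on version B (the rewrite author's own statement) =====
-- stated objective: alternative
-- what changed: B is an operator-stack machine: it reverses the query onto an explicit stack, pops the first operand, then repeatedly pops an operator and an operand off the stack, resolving tokens through one helper and applying the operator via a dispatch table of set-functions (defaulting to the identity), replacing A's index loop over range(1, len-1, 2) with the three-branch resolution code inlined twice and an if/elif operator chain.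
import Mathlib
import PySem

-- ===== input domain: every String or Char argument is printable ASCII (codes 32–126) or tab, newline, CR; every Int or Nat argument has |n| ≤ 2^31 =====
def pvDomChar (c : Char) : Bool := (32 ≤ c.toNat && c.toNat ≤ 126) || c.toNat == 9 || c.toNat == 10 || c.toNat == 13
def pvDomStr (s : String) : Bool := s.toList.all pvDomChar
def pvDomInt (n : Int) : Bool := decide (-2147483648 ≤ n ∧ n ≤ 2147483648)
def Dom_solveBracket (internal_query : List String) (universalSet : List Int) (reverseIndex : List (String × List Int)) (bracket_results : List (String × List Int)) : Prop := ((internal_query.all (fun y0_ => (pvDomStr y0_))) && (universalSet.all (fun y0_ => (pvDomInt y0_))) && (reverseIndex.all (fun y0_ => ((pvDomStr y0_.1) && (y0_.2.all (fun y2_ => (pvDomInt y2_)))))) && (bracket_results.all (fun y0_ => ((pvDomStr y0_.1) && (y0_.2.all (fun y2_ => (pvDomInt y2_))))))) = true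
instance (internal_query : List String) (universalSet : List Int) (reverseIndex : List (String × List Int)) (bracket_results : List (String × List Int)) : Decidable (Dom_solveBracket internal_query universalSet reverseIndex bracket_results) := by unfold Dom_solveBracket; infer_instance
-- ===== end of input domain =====

-- B replaces A's index loop (with the three-branch token resolution inlined twice and an
-- if/elif operator chain) by an explicit stack machine: the reversed query is popped one
-- operator/operand pair at a time, tokens are resolved by one helper, and the operator is
-- applied via a dispatch table of set-functions; objective: alternative decomposition, same cost.

-- ===== PORT A =====
def solveBracket (internal_query : List String) (universalSet : List Int) (reverseIndex : List (String × List Int)) (bracket_results : List (String × List Int)) : List Int :=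
  let result :=
    if PySem.Str.isIn "bracket_result" (PySem.List.pyGetD internal_query 0 "") then
      (PySem.Dict.mk bracket_results).getD (PySem.Str.strip (PySem.List.pyGetD internal_query 0 "")) []
    else
      if PySem.Str.isIn "not_" (PySem.List.pyGetD internal_query 0 "") then
        PySem.Set.diff universalSet ((PySem.Dict.mk reverseIndex).getD (PySem.Str.strip (PySem.Str.replace (PySem.List.pyGetD internal_query 0 "") "not_" "")) [])
      else
        (PySem.Dict.mk reverseIndex).getD (PySem.List.pyGetD internal_query 0 "") []
  (PySem.List.pyRange 1 (PySem.List.len internal_query - 1) 2).foldl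
    (fun result i =>
      let operator := PySem.List.pyGetD internal_query i ""
      let operand2 := PySem.List.pyGetD internal_query (i + 1) ""
      let term2 :=
        if PySem.Str.isIn "bracket_result" operand2 then
          (PySem.Dict.mk bracket_results).getD (PySem.Str.strip operand2) []
        else
          if PySem.Str.isIn "not_" operand2 then
            PySem.Set.diff universalSet ((PySem.Dict.mk reverseIndex).getD (PySem.Str.strip (PySem.Str.replace operand2 "not_" "")) [])
          else
            (PySem.Dict.mk reverseIndex).getD operand2 []
      if operator == "and" then PySem.Set.inter result term2
      else if operator == "or" then PySem.Set.union result term2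
      else result)
    result

-- ===== PORT B =====
-- Source B's helper resolve(tok)
def pvResolve (universalSet : List Int) (reverseIndex : List (String × List Int)) (bracket_results : List (String × List Int)) (tok : String) : List Int :=
  if PySem.Str.isIn "bracket_result" tok then
    (PySem.Dict.mk bracket_results).getD (PySem.Str.strip tok) []
  else
    if PySem.Str.isIn "not_" tok then
      PySem.Set.diff universalSet ((PySem.Dict.mk reverseIndex).getD (PySem.Str.strip (PySem.Str.replace tok "not_" "")) [])
    else
      (PySem.Dict.mk reverseIndex).getD tok []

-- Source B's dispatch table apply_op
def pvApplyOp : PySem.Dict String (List Int → List Int → List Int) :=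
  PySem.Dict.mk [("and", fun x y => PySem.Set.inter x y), ("or", fun x y => PySem.Set.union x y)]

-- Source B's while-loop: pop an operator and an operand off the stack until fewer than 2 remain
def pvLoop (universalSet : List Int) (reverseIndex : List (String × List Int)) (bracket_results : List (String × List Int)) (result : List Int) (stack : List String) : List Int :=
  if 2 ≤ stack.length then
    match h1 : PySem.List.pop? stack with
    | none => result
    | some (op, stack1) =>
      match h2 : PySem.List.pop? stack1 with
      | none => result
      | some (tok, stack2) =>
        pvLoop universalSet reverseIndex bracket_results
          ((pvApplyOp.getD op (fun x _y => x)) result (pvResolve universalSet reverseIndex bracket_results tok)) stack2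
  else result
termination_by stack.length
decreasing_by
  have a1 := PySem.List.length_of_pop?_eq_some stack h1
  have a2 := PySem.List.length_of_pop?_eq_some stack1 h2
  simp at a1 a2
  omega

def solveBracket_alt (internal_query : List String) (universalSet : List Int) (reverseIndex : List (String × List Int)) (bracket_results : List (String × List Int)) : List Int :=
  let stack := (PySem.List.slice? internal_query none none (-1)).getD []
  match PySem.List.pop? stack with
  | none => []   -- empty query: Python raises IndexError here (outside Pre_)
  | some (t0, stack1) =>
    pvLoop universalSet reverseIndex bracket_results
      (pvResolve universalSet reverseIndex bracket_results t0) stack1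

-- ===== PRECONDITION & SPEC =====
-- Pre_ excludes exactly the inputs where Python A raises: an empty query (IndexError on
-- internal_query[0]) and queries whose resolved (even-position) tokens miss their dict key (KeyError).
def Pre_solveBracket (internal_query : List String) (universalSet : List Int) (reverseIndex : List (String × List Int)) (bracket_results : List (String × List Int)) : Prop :=
  internal_query ≠ [] ∧
  ∀ j ∈ PySem.List.pyRange 0 (PySem.List.len internal_query) 2,
    (let tok := PySem.List.pyGetD internal_query j ""
     if PySem.Str.isIn "bracket_result" tok then
       (PySem.Dict.mk bracket_results).contains (PySem.Str.strip tok) = true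
     else if PySem.Str.isIn "not_" tok then
       (PySem.Dict.mk reverseIndex).contains (PySem.Str.strip (PySem.Str.replace tok "not_" "")) = true
     else
       (PySem.Dict.mk reverseIndex).contains tok = true)
instance (internal_query : List String) (universalSet : List Int) (reverseIndex : List (String × List Int)) (bracket_results : List (String × List Int)) : Decidable (Pre_solveBracket internal_query universalSet reverseIndex bracket_results) := by unfold Pre_solveBracket; infer_instance

def pvWitness_solveBracket : List String × List Int × (List (String × List Int)) × (List (String × List Int)) :=
  (["a", "and", "not_b"], [1, 2, 3], [("a", [1, 2]), ("b", [2])], [])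

def Spec_solveBracket (internal_query : List String) (universalSet : List Int) (reverseIndex : List (String × List Int)) (bracket_results : List (String × List Int)) (out : List Int) : Prop := out = solveBracket_alt internal_query universalSet reverseIndex bracket_results
instance (internal_query : List String) (universalSet : List Int) (reverseIndex : List (String × List Int)) (bracket_results : List (String × List Int)) (out : List Int) : Decidable (Spec_solveBracket internal_query universalSet reverseIndex bracket_results out) := by unfold Spec_solveBracket; infer_instance

-- ===== CLAIM (what is proved, stated in full; the proofs are below) =====
def Claim_equal_solveBracket : Prop := ∀ (internal_query : List String) (universalSet : List Int) (reverseIndex : List (String × List Int)) (bracket_results : List (String × List Int)), Dom_solveBracket internal_query universalSet reverseIndex bracket_results → Pre_solveBracket internal_query universalSet reverseIndex bracket_results → Spec_solveBracket internal_query universalSet reverseIndex bracket_results (solveBracket internal_query universalSet reverseIndex bracket_results)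

-- ===== LEMMAS AND PROOFS =====

-- common bridge: left-to-right chain over (operator, operand-token) pairs of the tail
def pvChain (universalSet : List Int) (reverseIndex : List (String × List Int)) (bracket_results : List (String × List Int)) : List Int → List String → List Int
  | acc, op :: tok :: rest =>
    pvChain universalSet reverseIndex bracket_results
      (if op == "and" then PySem.Set.inter acc (pvResolve universalSet reverseIndex bracket_results tok)
       else if op == "or" then PySem.Set.union acc (pvResolve universalSet reverseIndex bracket_results tok)
       else acc) rest
  | acc, _ => acc

-- the dispatch table applied to op is A's if/elif chain
theorem applyOp_getD (op : String) (a t : List Int) :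
    (pvApplyOp.getD op (fun x _y => x)) a t
      = (if op == "and" then PySem.Set.inter a t else if op == "or" then PySem.Set.union a t else a) := by
  rw [PySem.Dict.getD_eq_get?_getD]
  by_cases h1 : op = "and"
  · simp [pvApplyOp, PySem.Dict.get?_mk_cons, h1]
  · by_cases h2 : op = "or"
    · simp [pvApplyOp, PySem.Dict.get?_mk_cons, h2]
    · have h1' : ¬ ("and" = op) := fun h => h1 h.symm
      have h2' : ¬ ("or" = op) := fun h => h2 h.symm
      simp [pvApplyOp, h1', h2', PySem.Dict.get?, h1, h2]

-- range(a, b, 2) unfolding lemmas (step 2 is not covered by the pyRange_one_* book)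
theorem pyRange_two_nil (a b : Int) (h : b ≤ a) : PySem.List.pyRange a b 2 = [] := by
  rw [PySem.List.pyRange_of_pos (s := 2) a b (by omega)]
  simp [show ¬ a < b by omega]

theorem pyRange_two_cons (a b : Int) (h : a < b) :
    PySem.List.pyRange a b 2 = a :: PySem.List.pyRange (a + 2) b 2 := by
  rw [PySem.List.pyRange_of_pos (s := 2) a b (by omega),
      PySem.List.pyRange_of_pos (s := 2) (a + 2) b (by omega)]
  by_cases h2 : a + 2 < b
  · simp only [if_pos h, if_pos h2]
    have : ((b - a + 2 - 1) / 2).toNat = ((b - (a + 2) + 2 - 1) / 2).toNat + 1 := by omega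
    rw [this, List.range_succ_eq_map]
    simp [List.map_map, Function.comp]
    intro k _
    ring
  · simp only [if_pos h, if_neg h2]
    have : ((b - a + 2 - 1) / 2).toNat = 1 := by omega
    simp [this, List.range_succ]

-- A's indexed fold over range(a, len(q)-1, 2) is the chain over the tokens from position a
theorem foldl_idx_chain (universalSet : List Int) (reverseIndex : List (String × List Int)) (bracket_results : List (String × List Int)) (q : List String) :
    ∀ (fuel : ℕ) (a : ℕ) (l : List String) (acc : List Int), q.drop a = l → l.length ≤ fuel →
    (PySem.List.pyRange (a : Int) ((q.length : Int) - 1) 2).foldl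
      (fun r i =>
        if PySem.List.pyGetD q i "" == "and" then
          PySem.Set.inter r (pvResolve universalSet reverseIndex bracket_results (PySem.List.pyGetD q (i + 1) ""))
        else if PySem.List.pyGetD q i "" == "or" then
          PySem.Set.union r (pvResolve universalSet reverseIndex bracket_results (PySem.List.pyGetD q (i + 1) ""))
        else r) acc
      = pvChain universalSet reverseIndex bracket_results acc l := by
  intro fuel
  induction fuel with
  | zero =>
    intro a l acc hdrop hlen
    have hl : l = [] := List.length_eq_zero_iff.mp (Nat.le_zero.mp hlen)
    subst hl
    have hq : q.length ≤ a := by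
      by_contra hc
      have := List.drop_eq_nil_iff.mp hdrop
      omega
    rw [pyRange_two_nil _ _ (by push_cast; omega)]
    simp [pvChain]
  | succ m ih =>
    intro a l acc hdrop hlen
    match l with
    | [] =>
      have hq : q.length ≤ a := by
        by_contra hc
        have := List.drop_eq_nil_iff.mp hdrop
        omega
      rw [pyRange_two_nil _ _ (by push_cast; omega)]
      simp [pvChain]
    | [op] =>
      have hq : q.length = a + 1 := by
        have h1 := congrArg List.length hdrop
        simp [List.length_drop] at h1
        omega
      rw [pyRange_two_nil _ _ (by push_cast; omega)]
      simp [pvChain]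
    | op :: tok :: rest =>
      have hq : q.length = a + 2 + rest.length := by
        have h1 := congrArg List.length hdrop
        simp [List.length_drop] at h1
        omega
      have hcons : PySem.List.pyRange (a : Int) ((q.length : Int) - 1) 2
          = (a : Int) :: PySem.List.pyRange ((a : Int) + 2) ((q.length : Int) - 1) 2 := by
        apply pyRange_two_cons
        push_cast
        omega
      have hop : q[a]? = some op := by
        have h := congrArg (fun t => t[0]?) hdrop
        simpa using h
      have htok : q[a + 1]? = some tok := by
        have h := congrArg (fun t => t[1]?) hdrop
        simpa using h
      have hgop : PySem.List.pyGetD q ((a : Int)) "" = op := by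
        rw [PySem.List.pyGetD_natCast]
        simp [List.getD_eq_getElem?_getD, hop]
      have hgtok : PySem.List.pyGetD q ((a : Int) + 1) "" = tok := by
        have : ((a : Int) + 1) = ((a + 1 : ℕ) : Int) := by push_cast; ring
        rw [this, PySem.List.pyGetD_natCast]
        simp [List.getD_eq_getElem?_getD, htok]
      have hdrop2 : q.drop (a + 2) = rest := by
        have : q.drop (a + 2) = (q.drop a).drop 2 := by
          rw [List.drop_drop]
        rw [this, hdrop]; rfl
      rw [hcons]
      simp only [List.foldl_cons, hgop, hgtok]
      have hstep : ((a : Int) + 2) = ((a + 2 : ℕ) : Int) := by push_cast; ring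
      rw [hstep, ih (a + 2) rest _ hdrop2 (by simp at hlen; omega)]
      by_cases hand : op == "and"
      · simp [pvChain, hand]
      · by_cases hor : op == "or"
        · simp [pvChain, hand, hor]
        · simp [pvChain, hand, hor]

-- Source B's while-loop on the reversed query is the chain over the query tail
theorem loop_reverse (universalSet : List Int) (reverseIndex : List (String × List Int)) (bracket_results : List (String × List Int)) :
    ∀ (fuel : ℕ) (l : List String) (acc : List Int), l.length ≤ fuel →
    pvLoop universalSet reverseIndex bracket_results acc l.reverse
      = pvChain universalSet reverseIndex bracket_results acc l := by
  intro fuel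
  induction fuel with
  | zero =>
    intro l acc hlen
    have hl : l = [] := List.length_eq_zero_iff.mp (Nat.le_zero.mp hlen)
    subst hl
    rw [pvLoop]
    simp [pvChain]
  | succ m ih =>
    intro l acc hlen
    match l with
    | [] =>
      rw [pvLoop]
      simp [pvChain]
    | [op] =>
      rw [pvLoop]
      rw [if_neg (by simp)]
      rfl
    | op :: tok :: rest =>
      have hrev : (op :: tok :: rest).reverse = (rest.reverse ++ [tok]) ++ [op] := by simp
      rw [hrev, pvLoop]
      rw [if_pos (by simp)]
      split
      · rename_i h
        rw [PySem.List.pop?_last] at h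
        cases h
      · rename_i op1 stack1 h
        rw [PySem.List.pop?_last] at h
        obtain ⟨rfl, rfl⟩ : op1 = op ∧ stack1 = rest.reverse ++ [tok] := by
          simpa [eq_comm] using h
        split
        · rename_i h2
          rw [PySem.List.pop?_last] at h2
          cases h2
        · rename_i tok1 stack2 h2
          rw [PySem.List.pop?_last] at h2
          obtain ⟨rfl, rfl⟩ : tok1 = tok ∧ stack2 = rest.reverse := by
            simpa [eq_comm] using h2
          rw [applyOp_getD]
          rw [ih rest _ (by simp at hlen; omega)]
          conv_rhs => rw [pvChain]

theorem solveBracket_alt_eq_chain (t0 : String) (rest : List String) (universalSet : List Int)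
    (reverseIndex : List (String × List Int)) (bracket_results : List (String × List Int)) :
    solveBracket_alt (t0 :: rest) universalSet reverseIndex bracket_results
      = pvChain universalSet reverseIndex bracket_results (pvResolve universalSet reverseIndex bracket_results t0) rest := by
  unfold solveBracket_alt
  rw [PySem.List.slice?_none_none_neg_one]
  simp only [Option.getD_some, List.reverse_cons, PySem.List.pop?_last]
  exact loop_reverse universalSet reverseIndex bracket_results rest.length rest _ le_rfl

-- ===== VERDICT (by name: the statement is the Claim_ definition above) =====
theorem solveBracket_spec : Claim_equal_solveBracket := by
  intro internal_query universalSet reverseIndex bracket_results _hdom hpre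
  unfold Spec_solveBracket
  obtain ⟨hne, -⟩ := hpre
  obtain ⟨t0, rest, rfl⟩ := List.exists_cons_of_ne_nil hne
  have hfold := foldl_idx_chain universalSet reverseIndex bracket_results (t0 :: rest)
    rest.length 1 rest (pvResolve universalSet reverseIndex bracket_results t0) (by simp) (by simp)
  have hA : solveBracket (t0 :: rest) universalSet reverseIndex bracket_results
      = pvChain universalSet reverseIndex bracket_results (pvResolve universalSet reverseIndex bracket_results t0) rest := by
    unfold solveBracket
    simp only [PySem.List.pyGetD_zero_cons]
    exact hfold
  rw [hA, solveBracket_alt_eq_chain]
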